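-- pv_equiv track=rewrite | github.com/BioMedBigDataCenter/VENAS | parsimony-informative.py | get_ref_pos
-- ===== SOURCE A (Python) =====
-- def get_ref_pos(ref_seq):
--     fa_pos = []
--     nt_pos = 0
--     for nt in range(0, len(ref_seq)):
--         if ref_seq[nt] != '-':
--             # 实际位置是下标加1
--             nt_pos += 1
--             fa_pos.append(nt_pos)
--         else:
--             fa_pos.append(nt_pos)
--     return fa_pos
-- ===== SOURCE B (Python) =====
-- def get_ref_pos(ref_seq):
--     # Two-stage, back-to-front: count all non-gap characters first, then walk the
--     # sequence in reverse, emitting the running count and decrementing it at each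
--     # non-gap character; finally reverse the emitted list.
--     pos = sum(1 for c in ref_seq if c != '-')
--     out = []
--     for c in reversed(ref_seq):
--         out.append(pos)
--         if c != '-':
--             pos -= 1
--     out.reverse()
--     return out
-- ===== Notes on version B (the rewrite author's own statement) =====
-- stated objective: alternative
-- what changed: B builds the result back-to-front in two stages: it first counts all non-gap characters, then traverses the sequence in reverse emitting the running count and decrementing it at each non-gap character, reversing the output at the end, instead of A's forward loop with an incrementing counter.
import Mathlib
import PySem

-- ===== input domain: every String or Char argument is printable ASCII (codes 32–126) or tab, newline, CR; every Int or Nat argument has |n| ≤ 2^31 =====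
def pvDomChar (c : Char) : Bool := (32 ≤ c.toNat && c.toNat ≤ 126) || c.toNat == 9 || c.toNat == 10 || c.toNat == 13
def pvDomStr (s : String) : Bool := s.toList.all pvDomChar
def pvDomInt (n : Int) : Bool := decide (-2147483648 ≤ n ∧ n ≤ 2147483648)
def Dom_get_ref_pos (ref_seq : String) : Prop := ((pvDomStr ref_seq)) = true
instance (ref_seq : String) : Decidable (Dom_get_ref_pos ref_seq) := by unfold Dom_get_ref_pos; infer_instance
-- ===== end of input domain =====

-- B builds the same positions back-to-front: count the non-gap characters first, then a
-- reverse pass emitting the running count and decrementing it (alternative; same cost).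

-- ===== PORT A =====
def get_ref_pos (ref_seq : String) : List Int :=
  ((PySem.List.pyRange 0 (PySem.Str.len ref_seq) 1).foldl
    (fun (st : List Int × Int) nt =>
      if PySem.List.pyGetD ref_seq.toList nt ' ' ≠ '-' then
        (st.1 ++ [st.2 + 1], st.2 + 1)
      else
        (st.1 ++ [st.2], st.2))
    ([], 0)).1

-- ===== PORT B =====
-- pos = sum(1 for c in ref_seq if c != '-'); reverse pass appending pos and decrementing;
-- out.reverse() at the end
def get_ref_pos_alt (ref_seq : String) : List Int :=
  let pos0 : Int := ref_seq.toList.foldl (fun a c => a + (if c ≠ '-' then 1 else 0)) 0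
  let st := ref_seq.toList.reverse.foldl
      (fun (st : List Int × Int) c =>
        (st.1 ++ [st.2], if c ≠ '-' then st.2 - 1 else st.2))
      ([], pos0)
  st.1.reverse

-- ===== PRECONDITION & SPEC =====
def Spec_get_ref_pos (ref_seq : String) (out : List Int) : Prop := out = get_ref_pos_alt ref_seq
instance (ref_seq : String) (out : List Int) : Decidable (Spec_get_ref_pos ref_seq out) := by unfold Spec_get_ref_pos; infer_instance

-- ===== CLAIM (what is proved, stated in full; the proofs are below) =====
def Claim_equal_get_ref_pos : Prop := ∀ (ref_seq : String), Dom_get_ref_pos ref_seq → Spec_get_ref_pos ref_seq (get_ref_pos ref_seq)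

-- ===== LEMMAS AND PROOFS =====

-- Common reference value: prefix sums of the 0/1 non-gap indicator list.
def pvAccum : Int → List Int → List Int
  | _, [] => []
  | acc, x :: xs => (acc + x) :: pvAccum (acc + x) xs

def pvInd (c : Char) : Int := if c ≠ '-' then 1 else 0

-- A's loop invariant: folding A's body over the indices of the suffix `cs` of `pre ++ cs`
-- appends exactly the prefix sums pvAccum pos (indicators of cs).
theorem pvLoopA (cs : List Char) (pre : List Char) (acc : List Int) (pos : Int) :
    ((PySem.List.pyRange (pre.length : Int) (pre.length + cs.length) 1).foldl
      (fun (st : List Int × Int) nt =>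
        if PySem.List.pyGetD (pre ++ cs) nt ' ' ≠ '-' then
          (st.1 ++ [st.2 + 1], st.2 + 1)
        else
          (st.1 ++ [st.2], st.2))
      (acc, pos))
    = (acc ++ pvAccum pos (cs.map pvInd), pos + ((cs.countP (fun c => c ≠ '-') : Int))) := by
  induction cs generalizing pre acc pos with
  | nil =>
    simp [PySem.List.pyRange_one_eq_nil, pvAccum]
  | cons c cs ih =>
    have hcons : PySem.List.pyRange (pre.length : Int) (pre.length + (c :: cs).length) 1
        = (pre.length : Int) :: PySem.List.pyRange ((pre.length : Int) + 1) (pre.length + (c :: cs).length) 1 := by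
      apply PySem.List.pyRange_one_cons
      simp only [List.length_cons]; push_cast; omega
    rw [hcons]
    simp only [List.foldl_cons]
    have hget : PySem.List.pyGetD (pre ++ c :: cs) (pre.length : Int) ' ' = c := by
      simp [PySem.List.pyGetD]
    rw [hget]
    have hlen : ((pre.length : Int) + 1) = (((pre ++ [c]).length : Nat) : Int) := by simp
    have hlen2 : ((pre.length : Int) + (c :: cs).length) = ((pre ++ [c]).length : Int) + cs.length := by
      simp only [List.length_cons, List.length_append, List.length_nil]; push_cast; omega
    rw [hlen, hlen2, show pre ++ c :: cs = (pre ++ [c]) ++ cs by simp]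
    by_cases hc : c = '-'
    · rw [if_neg (by simp [hc])]
      rw [ih (pre := pre ++ [c]) (acc := acc ++ [pos]) (pos := pos)]
      simp [pvAccum, pvInd, hc]
    · rw [if_pos (by simpa using hc)]
      rw [ih (pre := pre ++ [c]) (acc := acc ++ [pos + 1]) (pos := pos + 1)]
      simp [pvAccum, pvInd, hc]
      omega

-- B's counting pass computes the sum of the indicators.
theorem pvSum (cs : List Char) (b : Int) :
    cs.foldl (fun a c => a + (if c ≠ '-' then 1 else 0)) b = b + (cs.map pvInd).sum := by
  induction cs generalizing b with
  | nil => simp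
  | cons c cs ih =>
    simp only [List.foldl_cons, List.map_cons, List.sum_cons]
    rw [ih]
    simp [pvInd]
    split_ifs <;> ring

-- B's reverse pass (as a foldr over the forward list), started at the total indicator sum
-- offset by b, builds the reverse of pvAccum b (indicators) and ends with counter b.
theorem pvLoopB (cs : List Char) (b : Int) :
    cs.foldr
      (fun c (st : List Int × Int) =>
        (st.1 ++ [st.2], if c ≠ '-' then st.2 - 1 else st.2))
      ([], b + (cs.map pvInd).sum)
    = ((pvAccum b (cs.map pvInd)).reverse, b) := by
  induction cs generalizing b with
  | nil => simp [pvAccum]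
  | cons c cs ih =>
    simp only [List.foldr_cons]
    have h : b + ((c :: cs).map pvInd).sum = (b + pvInd c) + (cs.map pvInd).sum := by
      simp [pvInd]; ring
    rw [h, ih (b := b + pvInd c)]
    by_cases hc : c = '-'
    · simp [pvAccum, pvInd, hc]
    · simp [pvAccum, pvInd, hc]

-- ===== VERDICT (by name: the statement is the Claim_ definition above) =====
theorem get_ref_pos_spec : Claim_equal_get_ref_pos := by
  intro s _
  unfold Spec_get_ref_pos get_ref_pos get_ref_pos_alt
  have hA := pvLoopA s.toList [] [] 0
  simp only [List.length_nil, List.nil_append, Nat.cast_zero, zero_add] at hA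
  rw [show PySem.Str.len s = (s.toList.length : Int) from PySem.Str.len_eq s] at *
  have hB0 := pvSum s.toList 0
  simp only [zero_add] at hB0
  simp only [hB0, List.foldl_reverse]
  have hB := pvLoopB s.toList 0
  simp only [zero_add] at hB
  -- foldl over reverse = foldr with flipped function (List.foldl_reverse already applied)
  rw [hB]
  refine (congrArg Prod.fst hA).trans ?_
  simp
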